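-- pv_equiv track=rewrite | github.com/zhengJade/WeiboFilter | DataProvider/data.py | forward_filter
-- ===== SOURCE A (Python) =====
-- def forward_filter(text: str):
--     str_text = ''
--     count = 0
--     text_list = list(text)
--     for s in text_list:
--         if s == '/' and count == 3:
--             count = 2
--             str_text = ''
--             continue
--         elif s == '/':
--             count += 1
--             continue
--         if s == ':':
--             str_text = ''
--             continue
--         str_text += s
--
--     return str_text
-- ===== SOURCE B (Python) =====
-- def forward_filter(text: str):
--     count = 0
--     last = -1
--     for i, s in enumerate(text):
--         if s == '/':
--             if count == 3:
--                 count = 2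
--                 last = i
--             else:
--                 count += 1
--         elif s == ':':
--             last = i
--     return ''.join(c for c in text[last + 1:] if c != '/')
-- ===== Notes on version B (the rewrite author's own statement) =====
-- stated objective: alternative
-- what changed: B replaces A's inline string accumulation by a locate-then-project decomposition: one pass records only the index of the last reset event (':' or the count==3 '/'), then the result is the suffix after that index with '/' characters filtered out.
import Mathlib
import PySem

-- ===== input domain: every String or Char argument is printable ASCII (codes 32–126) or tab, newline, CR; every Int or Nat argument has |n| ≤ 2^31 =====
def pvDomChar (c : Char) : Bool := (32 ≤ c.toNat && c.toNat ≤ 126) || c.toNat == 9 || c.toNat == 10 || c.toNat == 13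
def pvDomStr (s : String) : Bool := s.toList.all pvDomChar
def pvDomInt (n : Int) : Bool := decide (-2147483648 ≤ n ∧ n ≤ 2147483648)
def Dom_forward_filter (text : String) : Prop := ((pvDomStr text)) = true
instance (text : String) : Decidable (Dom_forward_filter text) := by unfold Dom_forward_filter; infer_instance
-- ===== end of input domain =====

-- B locates the last reset event (':' or the count==3 '/') in one pass, then returns the '/'-free
-- suffix after it, instead of A's inline string accumulation; objective: alternative decomposition.

-- ===== PORT A =====
-- A-side helper: one step of A's loop over (str_text, count)
def ffStepA (st : List Char × Int) (s : Char) : List Char × Int :=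
  if s = '/' ∧ st.2 = 3 then ([], 2)
  else if s = '/' then (st.1, st.2 + 1)
  else if s = ':' then ([], st.2)
  else (st.1 ++ [s], st.2)

def forward_filter (text : String) : String :=
  String.ofList (text.toList.foldl ffStepA ([], 0)).1

-- ===== PORT B =====
-- B-side helper: one step of B's loop over (count, last)
def ffStepB (st : Int × Int) (p : Int × Char) : Int × Int :=
  if p.2 = '/' then (if st.1 = 3 then (2, p.1) else (st.1 + 1, st.2))
  else if p.2 = ':' then (st.1, p.1)
  else st

def forward_filter_alt (text : String) : String :=
  let cs := text.toList
  let st := (PySem.List.enumerate cs).foldl ffStepB (0, -1)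
  String.ofList ((PySem.List.slice cs (some (st.2 + 1)) none).filter (fun c => c ≠ '/'))

-- ===== PRECONDITION & SPEC =====
def Spec_forward_filter (text : String) (out : String) : Prop := out = forward_filter_alt text
instance (text : String) (out : String) : Decidable (Spec_forward_filter text out) := by unfold Spec_forward_filter; infer_instance

-- ===== CLAIM (what is proved, stated in full; the proofs are below) =====
def Claim_equal_forward_filter : Prop := ∀ (text : String), Dom_forward_filter text → Spec_forward_filter text (forward_filter text)

-- ===== LEMMAS AND PROOFS =====

-- Invariant: after processing prefix p, A's accumulator is exactly the '/'-filtered suffix of p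
-- past B's last reset index; carried through the remaining characters cs.
lemma ff_inv (cs : List Char) : ∀ (p : List Char) (count last : Int) (acc : List Char),
    -1 ≤ last → last < (p.length : Int) →
    acc = ((p.drop (last + 1).toNat).filter (fun c => c ≠ '/')) →
    (cs.foldl ffStepA (acc, count)).1 =
      (((p ++ cs).drop ((((PySem.List.enumerate cs (p.length : Int)).foldl ffStepB (count, last)).2 + 1).toNat)).filter (fun c => c ≠ '/'))
    ∧ -1 ≤ ((PySem.List.enumerate cs (p.length : Int)).foldl ffStepB (count, last)).2
    ∧ ((PySem.List.enumerate cs (p.length : Int)).foldl ffStepB (count, last)).2 < ((p ++ cs).length : Int) := by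
  induction cs with
  | nil =>
      intro p count last acc h1 h2 h3
      simp only [PySem.List.enumerate_nil, List.foldl_nil, List.append_nil]
      exact ⟨h3, h1, h2⟩
  | cons c cs' ih =>
      intro p count last acc h1 h2 h3
      rw [PySem.List.enumerate_cons, List.foldl_cons, List.foldl_cons]
      by_cases hsl : c = '/'
      · subst hsl
        have hpc : p ++ '/' :: cs' = (p ++ ['/']) ++ cs' := by simp
        have hlen : ((p ++ ['/']).length : Int) = (p.length : Int) + 1 := by simp
        by_cases h3c : count = 3
        · -- reset case: count := 2, last := current index, acc := []
          rw [show ffStepA (acc, count) '/' = ([], 2) by simp [ffStepA, h3c],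
            show ffStepB (count, last) ((p.length : Int), '/') = (2, (p.length : Int)) by
              simp [ffStepB, h3c],
            hpc, ← hlen]
          exact ih (p ++ ['/']) 2 (p.length : Int) []
            (by omega) (by simp) (by simp)
        · -- plain '/': count += 1, acc and last unchanged
          rw [show ffStepA (acc, count) '/' = (acc, count + 1) by simp [ffStepA, h3c],
            show ffStepB (count, last) ((p.length : Int), '/') = (count + 1, last) by
              simp [ffStepB, h3c],
            hpc, ← hlen]
          refine ih (p ++ ['/']) (count + 1) last acc h1 (by omega) ?_
          have hle : (last + 1).toNat ≤ p.length := by omega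
          rw [List.drop_append_of_le_length hle, List.filter_append]
          simpa using h3
      · by_cases hco : c = ':'
        · -- ':' reset: acc := [], last := current index
          subst hco
          have hpc : p ++ ':' :: cs' = (p ++ [':']) ++ cs' := by simp
          have hlen : ((p ++ [':']).length : Int) = (p.length : Int) + 1 := by simp
          rw [show ffStepA (acc, count) ':' = ([], count) by simp [ffStepA],
            show ffStepB (count, last) ((p.length : Int), ':') = (count, (p.length : Int)) by
              simp [ffStepB],
            hpc, ← hlen]
          exact ih (p ++ [':']) count (p.length : Int) []
            (by omega) (by simp) (by simp)
        · -- ordinary character: appended to acc, kept by the filter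
          have hpc : p ++ c :: cs' = (p ++ [c]) ++ cs' := by simp
          have hlen : ((p ++ [c]).length : Int) = (p.length : Int) + 1 := by simp
          rw [show ffStepA (acc, count) c = (acc ++ [c], count) by simp [ffStepA, hsl, hco],
            show ffStepB (count, last) ((p.length : Int), c) = (count, last) by
              simp [ffStepB, hsl, hco],
            hpc, ← hlen]
          refine ih (p ++ [c]) count last (acc ++ [c]) h1 (by omega) ?_
          have hle : (last + 1).toNat ≤ p.length := by omega
          rw [List.drop_append_of_le_length hle, List.filter_append]
          simp [hsl, h3]

-- ===== VERDICT (by name: the statement is the Claim_ definition above) =====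
theorem forward_filter_spec : Claim_equal_forward_filter := by
  intro text _
  unfold Spec_forward_filter forward_filter forward_filter_alt
  have h := ff_inv text.toList [] 0 (-1) [] (by norm_num) (by norm_num) (by simp)
  simp only [List.length_nil, Nat.cast_zero, List.nil_append] at h
  obtain ⟨he, hge, _⟩ := h
  dsimp only
  simp only [PySem.List.slice_from text.toList
    (by omega : (0:Int) ≤ (List.foldl ffStepB (0, -1) (PySem.List.enumerate text.toList 0)).2 + 1)]
  exact congrArg String.ofList he
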